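-- pv_equiv track=rewrite | github.com/bporourke2/pes-hydrotesting | user_store.py | resolve_role
-- ===== SOURCE A (Python) =====
-- ADMIN_GROUPS = {'hydro-admin'}
--
-- USER_GROUPS = {'hydro', 'hydro-admin'}
--
-- def resolve_role(groups):
--     """Determine role from OIDC group list. Returns role string or None if no matching group."""
--     if not groups:
--         return None
--     group_set = set(g.lower() for g in groups) if groups else set()
--     if group_set & ADMIN_GROUPS:
--         return 'hydro-admin'
--     if group_set & USER_GROUPS:
--         return 'hydro'
--     return None
-- ===== SOURCE B (Python) =====
-- ADMIN_GROUPS = {'hydro-admin'}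
--
-- USER_GROUPS = {'hydro', 'hydro-admin'}
--
-- _RANK = {'hydro-admin': 2, 'hydro': 1}
--
-- def resolve_role(groups):
--     """Determine role from OIDC group list. Returns role string or None if no matching group."""
--     if not groups:
--         return None
--     rank = max(_RANK.get(g.lower(), 0) for g in groups)
--     return 'hydro-admin' if rank == 2 else ('hydro' if rank == 1 else None)
-- ===== Notes on version B (the rewrite author's own statement) =====
-- stated objective: alternative
-- what changed: Replaces A's set construction plus two priority-ordered set intersections with a numeric ranking: each group is mapped through a rank table (admin=2, user=1, other=0), the maximum rank is taken, and the role is decoded from that single number.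
import Mathlib
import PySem

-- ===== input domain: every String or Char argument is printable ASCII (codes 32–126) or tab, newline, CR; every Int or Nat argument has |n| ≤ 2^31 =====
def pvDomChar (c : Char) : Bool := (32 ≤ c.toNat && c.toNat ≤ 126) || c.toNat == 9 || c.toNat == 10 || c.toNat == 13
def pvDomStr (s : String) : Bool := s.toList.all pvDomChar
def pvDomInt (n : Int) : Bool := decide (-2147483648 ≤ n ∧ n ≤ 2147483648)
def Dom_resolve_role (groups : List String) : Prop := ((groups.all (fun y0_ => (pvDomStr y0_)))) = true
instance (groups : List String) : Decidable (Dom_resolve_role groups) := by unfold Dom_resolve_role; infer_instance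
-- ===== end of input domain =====

-- B replaces A's set construction plus two set intersections with a rank table (admin=2, user=1, other=0), a max over the input, and a decode of that number (objective: alternative).


-- ===== PORT A =====
def pvADMIN_GROUPS : PySem.Set String := PySem.Set.ofList ["hydro-admin"]
def pvUSER_GROUPS : PySem.Set String := PySem.Set.ofList ["hydro", "hydro-admin"]

def resolve_role (groups : List String) : Option String :=
  if groups = [] then none
  else
    let group_set : PySem.Set String :=
      if groups ≠ [] then PySem.Set.ofList (groups.map PySem.Str.lower) else PySem.Set.empty
    if PySem.Set.inter group_set pvADMIN_GROUPS ≠ [] then some "hydro-admin"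
    else if PySem.Set.inter group_set pvUSER_GROUPS ≠ [] then some "hydro"
    else none

-- ===== PORT B =====
def pvRANK : PySem.Dict String Int :=
  (PySem.Dict.empty.insert "hydro-admin" 2).insert "hydro" 1

def resolve_role_alt (groups : List String) : Option String :=
  if groups = [] then none
  else
    match PySem.List.max? (groups.map (fun g => PySem.Dict.getD pvRANK (PySem.Str.lower g) 0)) (fun x => x) with
    | none => none  -- unreachable: groups ≠ [] (Python's max would raise on empty)
    | some rank => if rank = 2 then some "hydro-admin" else if rank = 1 then some "hydro" else none

-- ===== PRECONDITION & SPEC =====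
def Spec_resolve_role (groups : List String) (out : Option String) : Prop := out = resolve_role_alt groups
instance (groups : List String) (out : Option String) : Decidable (Spec_resolve_role groups out) := by unfold Spec_resolve_role; infer_instance

-- ===== CLAIM (what is proved, stated in full; the proofs are below) =====
def Claim_equal_resolve_role : Prop := ∀ (groups : List String), Dom_resolve_role groups → Spec_resolve_role groups (resolve_role groups)

-- ===== LEMMAS AND PROOFS =====

-- the rank of one group, and the overall rank of a list
def pvRk (g : String) : Int := PySem.Dict.getD pvRANK (PySem.Str.lower g) 0
def pvR (gs : List String) : Int :=
  if gs.any (fun g => PySem.Str.lower g == "hydro-admin") then 2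
  else if gs.any (fun g => PySem.Str.lower g == "hydro") then 1 else 0

theorem pv_rk_eq (g : String) :
    pvRk g = if PySem.Str.lower g = "hydro-admin" then 2
             else if PySem.Str.lower g = "hydro" then 1 else 0 := by
  unfold pvRk pvRANK
  by_cases h1 : PySem.Str.lower g = "hydro-admin"
  · simp [h1, PySem.Dict.getD, PySem.Dict.get?, PySem.Dict.insert, PySem.Dict.empty]
  · by_cases h2 : PySem.Str.lower g = "hydro"
    · simp [h2, PySem.Dict.getD, PySem.Dict.get?, PySem.Dict.insert, PySem.Dict.empty]
    · simp [h1, h2, PySem.Dict.getD, PySem.Dict.get?, PySem.Dict.insert, PySem.Dict.empty,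
        List.find?, beq_eq_false_iff_ne.mpr (Ne.symm h1), beq_eq_false_iff_ne.mpr (Ne.symm h2)]

theorem pv_rk_nonneg (g : String) : 0 ≤ pvRk g := by
  rw [pv_rk_eq]; split_ifs <;> norm_num

theorem pv_R_cons (g : String) (gs : List String) :
    pvR (g :: gs) = max (pvRk g) (pvR gs) := by
  rw [pv_rk_eq]
  unfold pvR
  simp only [List.any_cons, Bool.or_eq_true, beq_iff_eq]
  by_cases h1 : PySem.Str.lower g = "hydro-admin" <;>
  by_cases h2 : PySem.Str.lower g = "hydro" <;>
  by_cases ha : (gs.any fun x => PySem.Str.lower x == "hydro-admin") = true <;>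
  by_cases hh : (gs.any fun x => PySem.Str.lower x == "hydro") = true <;>
  simp [h1, h2, ha, hh]

theorem pv_fold_max (gs : List String) (a : Int) (ha : 0 ≤ a) :
    (gs.map pvRk).foldl max a = max a (pvR gs) := by
  induction gs generalizing a with
  | nil =>
    unfold pvR; simpa using ha
  | cons g gs ih =>
    simp only [List.map_cons, List.foldl_cons]
    rw [ih (max a (pvRk g)) (le_trans ha (le_max_left _ _)), pv_R_cons]
    exact max_assoc a (pvRk g) (pvR gs)

theorem pv_max_ranks (g : String) (gs : List String) :
    PySem.List.max? ((g :: gs).map pvRk) (fun x => x) = some (pvR (g :: gs)) := by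
  rw [List.map_cons, PySem.List.max?_id_cons, pv_fold_max gs (pvRk g) (pv_rk_nonneg g), pv_R_cons]

-- A's nonempty-intersection test is "some element of the lowered list lies in the constant set".
theorem pv_inter_ne_nil (ls : List String) (t : PySem.Set String) :
    (PySem.Set.inter (PySem.Set.ofList ls) t ≠ []) ↔ ∃ x ∈ ls, x ∈ t := by
  constructor
  · intro h
    rcases List.exists_mem_of_ne_nil _ h with ⟨x, hx⟩
    have hx' := List.mem_filter.mp hx
    exact ⟨x, (PySem.Set.mem_ofList ls x).mp hx'.1, List.contains_iff_mem.mp hx'.2⟩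
  · rintro ⟨x, hxl, hxt⟩ h
    have : x ∈ PySem.Set.inter (PySem.Set.ofList ls) t :=
      List.mem_filter.mpr ⟨(PySem.Set.mem_ofList ls x).mpr hxl, List.contains_iff_mem.mpr hxt⟩
    simp [h] at this

theorem resolve_role_eq_alt (groups : List String) :
    resolve_role groups = resolve_role_alt groups := by
  unfold resolve_role resolve_role_alt
  match groups with
  | [] => simp
  | g :: gs =>
    have hmax := pv_max_ranks g gs
    have hrk : (fun g => PySem.Dict.getD pvRANK (PySem.Str.lower g) 0) = pvRk := rfl
    simp only [hrk, hmax, reduceCtorEq, ne_eq, not_false_eq_true, if_true, if_neg]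
    have hadmin : (PySem.Set.inter (PySem.Set.ofList ((g :: gs).map PySem.Str.lower)) pvADMIN_GROUPS ≠ [])
        ↔ ((g :: gs).any (fun x => PySem.Str.lower x == "hydro-admin")) = true := by
      rw [pv_inter_ne_nil]
      simp [pvADMIN_GROUPS, PySem.Set.ofList, PySem.Set.add, PySem.Set.empty, List.any_eq_true]
      exact or_congr eq_comm Iff.rfl
    have huser : (PySem.Set.inter (PySem.Set.ofList ((g :: gs).map PySem.Str.lower)) pvUSER_GROUPS ≠ [])
        ↔ (((g :: gs).any (fun x => PySem.Str.lower x == "hydro")) = true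
           ∨ ((g :: gs).any (fun x => PySem.Str.lower x == "hydro-admin")) = true) := by
      rw [pv_inter_ne_nil]
      simp [pvUSER_GROUPS, PySem.Set.ofList, PySem.Set.add, PySem.Set.empty, List.any_eq_true]
      constructor
      · rintro ((h | h) | ⟨a, ha', h | h⟩)
        exacts [Or.inl (Or.inl h), Or.inr (Or.inl h),
          Or.inl (Or.inr ⟨a, ha', h⟩), Or.inr (Or.inr ⟨a, ha', h⟩)]
      · rintro ((h | ⟨a, ha', h⟩) | h | ⟨a, ha', h⟩)
        exacts [Or.inl (Or.inl h), Or.inr ⟨a, ha', Or.inl h⟩,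
          Or.inl (Or.inr h), Or.inr ⟨a, ha', Or.inr h⟩]
    simp only [List.map_cons] at hadmin huser
    unfold pvR
    by_cases ha : ((g :: gs).any (fun x => PySem.Str.lower x == "hydro-admin")) = true
    · simp [hadmin.mpr ha, ha]
    · have hna : (PySem.Set.inter (PySem.Set.ofList (PySem.Str.lower g :: gs.map PySem.Str.lower)) pvADMIN_GROUPS = []) := by
        by_contra h; exact ha (hadmin.mp h)
      by_cases hu : ((g :: gs).any (fun x => PySem.Str.lower x == "hydro")) = true
      · simp [hna, huser.mpr (Or.inl hu), ha, hu]
      · have hnu : (PySem.Set.inter (PySem.Set.ofList (PySem.Str.lower g :: gs.map PySem.Str.lower)) pvUSER_GROUPS = []) := by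
          by_contra h
          rcases huser.mp h with h | h
          exacts [hu h, ha h]
        simp [hna, hnu, ha, hu]

-- ===== VERDICT (by name: the statement is the Claim_ definition above) =====
theorem resolve_role_spec : Claim_equal_resolve_role := by
  intro groups _
  unfold Spec_resolve_role
  exact resolve_role_eq_alt groups
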